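-- pv_equiv track=rewrite | github.com/Algorithm-Study-AS/Algorithm-study | 김민서/그리디/센서-2212.py | solution
-- ===== SOURCE A (Python) =====
-- def solution(n, k, c):
--     answer = []
--     c.sort()
--
--     if k >= n: # 집중국 수가 센서 수보다 크거나 같을 때
--         return 0
--
--     # 인접한 센서 간 거리를 구하고 내림차순 정렬한다.
--     for i in range(1, n):
--         answer.append(c[i] - c[i-1])
--
--     answer.sort(reverse = True)
--
--     # k개의 구간으로 나누기 위해 k-1번만큼 반복하며 값이 가장 큰 원소부터 차례로 제거한다.
--     for _ in range(k-1):
--         answer.pop(0)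
--
--     return sum(answer)
-- ===== SOURCE B (Python) =====
-- def solution(n, k, c):
--     # Like A, sorts c in place; the equivalence claimed is about the return value.
--     c.sort()
--     if k >= n:
--         return 0
--     gaps = [c[i] - c[i-1] for i in range(1, n)]
--     total = sum(gaps)
--     # Subtract the sum of the k-1 largest gaps, computed by an iterative
--     # three-way quickselect: the gap list is never sorted.
--     acc = 0
--     m = k - 1
--     xs = gaps
--     while True:
--         if m <= 0:
--             break
--         if m >= len(xs):
--             acc += sum(xs)
--             break
--         p = xs[0]
--         big = [x for x in xs if x > p]
--         eq = [x for x in xs if x == p]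
--         if m <= len(big):
--             xs = big
--         elif m <= len(big) + len(eq):
--             acc += sum(big) + p * (m - len(big))
--             break
--         else:
--             acc += sum(big) + sum(eq)
--             m -= len(big) + len(eq)
--             xs = [x for x in xs if x < p]
--     return total - acc
-- ===== Notes on version B (the rewrite author's own statement) =====
-- stated objective: alternative
-- what changed: B never sorts the gap list: it keeps the total of all gaps and subtracts the sum of the k-1 largest, found by an iterative three-way quickselect over (bigger, equal, smaller) partitions, instead of A's descending sort of the gaps followed by k-1 pop(0) calls and a final sum.
import Mathlib
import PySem

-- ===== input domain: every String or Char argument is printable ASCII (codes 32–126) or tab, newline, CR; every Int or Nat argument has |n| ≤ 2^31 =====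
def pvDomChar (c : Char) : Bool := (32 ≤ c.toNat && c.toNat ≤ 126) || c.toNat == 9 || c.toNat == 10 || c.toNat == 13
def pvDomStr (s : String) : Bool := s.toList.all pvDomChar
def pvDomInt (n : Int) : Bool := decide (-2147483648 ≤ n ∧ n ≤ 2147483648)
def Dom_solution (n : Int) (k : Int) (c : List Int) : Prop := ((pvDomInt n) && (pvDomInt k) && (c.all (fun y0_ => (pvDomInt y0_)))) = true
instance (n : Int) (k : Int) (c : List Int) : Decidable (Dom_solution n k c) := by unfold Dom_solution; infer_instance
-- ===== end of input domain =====

-- B never sorts the gap list: it subtracts the sum of the k-1 largest gaps, found by an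
-- iterative three-way quickselect, instead of A's descending sort + k-1 pop(0) loop.
-- Both Pythons sort c in place; the equivalence proved here is about the return value.

-- ===== PORT A =====
def solution (n : Int) (k : Int) (c : List Int) : Int :=
  let cs := PySem.List.sorted c (fun x => x) false
  if k ≥ n then 0
  else
    let answer := (PySem.List.pyRange 1 n 1).foldl
      (fun acc i => acc ++ [PySem.List.pyGetD cs i 0 - PySem.List.pyGetD cs (i - 1) 0]) []
    let answer := PySem.List.sorted answer (fun x => x) true
    -- for _ in range(k-1): answer.pop(0)   (pop(0) never sees an empty list inside Pre_)
    let answer := (PySem.List.pyRange 0 (k - 1) 1).foldl (fun acc _ => acc.tail) answer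
    answer.sum

-- ===== PORT B =====
-- Source B's while loop, step for step: state (xs, m, acc), each arm of the loop body in order
-- (xs strictly shrinks on the two continuing arms, which justifies the recursion).
def topAccB (xs : List Int) (m : Int) (acc : Int) : Int :=
  if m ≤ 0 then acc
  else if m ≥ (xs.length : Int) then acc + xs.sum
  else
    let p := PySem.List.pyGetD xs 0 0
    let big := xs.filter (fun x => p < x)
    let eq := xs.filter (fun x => x = p)
    if m ≤ (big.length : Int) then topAccB big m acc
    else if m ≤ (big.length : Int) + (eq.length : Int) then
      acc + big.sum + p * (m - big.length)
    else
      topAccB (xs.filter (fun x => x < p)) (m - big.length - eq.length)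
        (acc + big.sum + eq.sum)
termination_by xs.length
decreasing_by
  all_goals
    simp_wf
  all_goals
    rw [show xs.length = xs.attach.length from (List.length_attach).symm]
    apply List.length_filter_lt_length_iff_exists.mpr
    have hp : PySem.List.pyGetD xs 0 0 ∈ xs := by
      cases xs with
      | nil => simp at *; omega
      | cons x t =>
        simp [PySem.List.pyGetD, PySem.List.pyGet?, PySem.List.pyIdx?]
    exact ⟨⟨PySem.List.pyGetD xs 0 0, hp⟩, by simp, by simp⟩

def solution_alt (n : Int) (k : Int) (c : List Int) : Int :=
  let cs := PySem.List.sorted c (fun x => x) false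
  if k ≥ n then 0
  else
    let gaps := (PySem.List.pyRange 1 n 1).map
      (fun i => PySem.List.pyGetD cs i 0 - PySem.List.pyGetD cs (i - 1) 0)
    let total := gaps.sum
    total - topAccB gaps (k - 1) 0

-- ===== PRECONDITION & SPEC =====
-- Pre_ excludes exactly the inputs where A raises IndexError: k < n together with n ≥ 2
-- and n > len(c) makes A read c[i] past the end (B raises there too).
def Pre_solution (n : Int) (k : Int) (c : List Int) : Prop :=
  k ≥ n ∨ n ≤ 1 ∨ n ≤ (c.length : Int)
instance (n : Int) (k : Int) (c : List Int) : Decidable (Pre_solution n k c) := by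
  unfold Pre_solution; infer_instance
def pvWitness_solution : Int × Int × List Int := (5, 2, [1, 6, 9, 3, 6])

def Spec_solution (n : Int) (k : Int) (c : List Int) (out : Int) : Prop := out = solution_alt n k c
instance (n : Int) (k : Int) (c : List Int) (out : Int) : Decidable (Spec_solution n k c out) := by unfold Spec_solution; infer_instance

-- ===== CLAIM (what is proved, stated in full; the proofs are below) =====
def Claim_equal_solution : Prop := ∀ (n : Int) (k : Int) (c : List Int), Dom_solution n k c → Pre_solution n k c → Spec_solution n k c (solution n k c)

-- ===== LEMMAS AND PROOFS =====

-- iterating '.tail' once per element of l drops l.length elements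
theorem foldl_tail_eq_drop {α β : Type} (l : List β) (xs : List α) :
    l.foldl (fun a _ => a.tail) xs = xs.drop l.length := by
  induction l generalizing xs with
  | nil => simp
  | cons b t ih => simp [List.foldl_cons, ih, List.drop_tail]

theorem sorted_rev_eq_reverse_sorted (g : List Int) :
    PySem.List.sorted g (fun x => x) true = (PySem.List.sorted g (fun x => x) false).reverse := by
  apply PySem.List.eq_of_perm_of_pairwise_le_of_injective (fun x : Int => -x)
    neg_injective
  · exact (PySem.List.sorted_perm g _ true).trans
      ((PySem.List.sorted_perm g _ false).symm.trans (List.reverse_perm _).symm)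
  · have := PySem.List.sorted_pairwise_rev g (fun x : Int => x)
    exact this.imp (by intro a b h; simpa using h)
  · have := PySem.List.sorted_pairwise g (fun x : Int => x)
    simpa [List.pairwise_reverse] using this.imp (by intro a b h; simpa using h)

theorem sorted_rev_id_eq_of_perm_of_pairwise (xs ys : List Int)
    (hp : ys.Perm xs) (hd : ys.Pairwise (fun a b => b ≤ a)) :
    PySem.List.sorted xs (fun x => x) true = ys := by
  rw [sorted_rev_eq_reverse_sorted]
  have h1 : PySem.List.sorted xs (fun x => x) false = ys.reverse :=
    PySem.List.sorted_id_eq_of_perm_of_pairwise _ _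
      ((List.reverse_perm ys).trans hp)
      (by simpa [List.pairwise_reverse] using hd)
  rw [h1, List.reverse_reverse]

theorem partition3_perm (xs : List Int) (p : Int) :
    (xs.filter (fun x => p < x) ++ xs.filter (fun x => x = p)
      ++ xs.filter (fun x => x < p)).Perm xs := by
  induction xs with
  | nil => simp
  | cons x t ih =>
    rcases lt_trichotomy p x with h | h | h
    · rw [List.filter_cons_of_pos (by simpa using h),
        List.filter_cons_of_neg (by simp; omega),
        List.filter_cons_of_neg (by simp; omega)]
      simpa using ih.cons x
    · subst h
      rw [List.filter_cons_of_neg (by simp),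
        List.filter_cons_of_pos (by simp),
        List.filter_cons_of_neg (by simp)]
      have hsh : (t.filter (fun y => p < y) ++ p :: t.filter (fun y => y = p))
          ++ t.filter (fun y => y < p)
          = t.filter (fun y => p < y)
            ++ p :: (t.filter (fun y => y = p) ++ t.filter (fun y => y < p)) := by
        simp
      rw [hsh]
      refine List.perm_middle.trans (List.Perm.cons p ?_)
      simpa [List.append_assoc] using ih
    · rw [List.filter_cons_of_neg (by simp; omega),
        List.filter_cons_of_neg (by simp; omega),
        List.filter_cons_of_pos (by simpa using h)]
      exact List.perm_middle.trans (ih.cons x)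

theorem pairwise_ge_of_all_eq (l : List Int) (p : Int) (h : ∀ x ∈ l, x = p) :
    l.Pairwise (fun a b => b ≤ a) := by
  induction l with
  | nil => simp
  | cons x t ih =>
    refine List.pairwise_cons.mpr ⟨?_, ih (fun y hy => h y (List.mem_cons_of_mem _ hy))⟩
    intro y hy
    rw [h x List.mem_cons_self, h y (List.mem_cons_of_mem _ hy)]

theorem sum_take_all_eq (l : List Int) (p : Int) (h : ∀ x ∈ l, x = p) (j : Nat) :
    (l.take j).sum = (min j l.length : Nat) * p := by
  induction l generalizing j with
  | nil => simp
  | cons x t ih =>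
    cases j with
    | zero => simp
    | succ i =>
      rw [List.take_succ_cons, List.sum_cons, h x List.mem_cons_self,
        ih (fun y hy => h y (List.mem_cons_of_mem _ hy)) i]
      have hmin : min (i+1) (p::t).length = (min i t.length) + 1 := by rw [List.length_cons]; omega
      rw [hmin]
      push_cast; ring

theorem sorted_rev_partition3 (xs : List Int) (p : Int) :
    PySem.List.sorted xs (fun x => x) true
      = PySem.List.sorted (xs.filter (fun x => p < x)) (fun x => x) true
        ++ xs.filter (fun x => x = p)
        ++ PySem.List.sorted (xs.filter (fun x => x < p)) (fun x => x) true := by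
  apply sorted_rev_id_eq_of_perm_of_pairwise
  · refine List.Perm.trans ?_ (partition3_perm xs p)
    simpa [List.append_assoc] using
      ((PySem.List.sorted_perm (xs.filter (fun x => p < x)) (fun x => x) true).append
      (((List.Perm.refl (xs.filter (fun x => x = p)))).append
        (PySem.List.sorted_perm (xs.filter (fun x => x < p)) (fun x => x) true)))
  · have hbig : (PySem.List.sorted (xs.filter (fun x => p < x)) (fun x => x) true).Pairwise
        (fun a b => b ≤ a) :=
      (PySem.List.sorted_pairwise_rev _ _).imp (by intro a b h; simpa using h)
    have hsmall : (PySem.List.sorted (xs.filter (fun x => x < p)) (fun x => x) true).Pairwise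
        (fun a b => b ≤ a) :=
      (PySem.List.sorted_pairwise_rev _ _).imp (by intro a b h; simpa using h)
    have heq : (xs.filter (fun x => x = p)).Pairwise (fun a b => b ≤ a) :=
      pairwise_ge_of_all_eq _ p (fun x hx => by simpa using (List.mem_filter.mp hx).2)
    have hmem_big : ∀ a ∈ PySem.List.sorted (xs.filter (fun x => p < x)) (fun x => x) true,
        p < a := by
      intro a ha
      have := (PySem.List.mem_sorted _ _ _ _).mp ha
      simpa using (List.mem_filter.mp this).2
    have hmem_small : ∀ a ∈ PySem.List.sorted (xs.filter (fun x => x < p)) (fun x => x) true,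
        a < p := by
      intro a ha
      have := (PySem.List.mem_sorted _ _ _ _).mp ha
      simpa using (List.mem_filter.mp this).2
    have hmem_eq : ∀ a ∈ xs.filter (fun x => x = p), a = p := by
      intro a ha; simpa using (List.mem_filter.mp ha).2
    rw [List.append_assoc, List.pairwise_append]
    refine ⟨hbig, ?_, ?_⟩
    · rw [List.pairwise_append]
      refine ⟨heq, hsmall, ?_⟩
      intro a ha b hb
      rw [hmem_eq a ha]; exact (hmem_small b hb).le
    · intro a ha b hb
      rcases List.mem_append.mp hb with hb | hb
      · rw [hmem_eq b hb]; exact (hmem_big a ha).le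
      · exact ((hmem_small b hb).trans (hmem_big a ha)).le

theorem topAccB_eq_aux (N : Nat) : ∀ (xs : List Int), xs.length ≤ N → ∀ (m acc : Int),
    topAccB xs m acc
      = acc + ((PySem.List.sorted xs (fun x => x) true).take m.toNat).sum := by
  induction N with
  | zero =>
    intro xs hxs m acc
    have hnil : xs = [] := List.length_eq_zero_iff.mp (Nat.le_zero.mp hxs)
    subst hnil
    have hsn : PySem.List.sorted ([] : List Int) (fun x => x) true = [] := by
      rw [PySem.List.sorted_eq_nil_iff]
    rw [topAccB]
    split_ifs with hm hlen
    · simp [hsn]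
    · simp [hsn]
    · simp at hlen; omega
  | succ N ih =>
    intro xs hxs m acc
    have hm0 : ∀ x ∈ xs.filter (fun x => x = PySem.List.pyGetD xs 0 0),
        x = PySem.List.pyGetD xs 0 0 := by
      intro x hx; simpa using (List.mem_filter.mp hx).2
    rw [topAccB]
    split_ifs with hm hlen
    · simp [Int.toNat_of_nonpos (by omega : m ≤ 0)]
    · rw [List.take_of_length_le (by rw [PySem.List.length_sorted]; omega),
        (PySem.List.sorted_perm xs _ true).sum_eq]
    · -- xs nonempty here
      have hne : xs ≠ [] := by
        intro h; subst h; simp at hlen; omega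
      have hp : PySem.List.pyGetD xs 0 0 ∈ xs := by
        cases xs with
        | nil => exact absurd rfl hne
        | cons x t => simp [PySem.List.pyGetD, PySem.List.pyGet?, PySem.List.pyIdx?]
      have hblt : (xs.filter (fun x => PySem.List.pyGetD xs 0 0 < x)).length < xs.length :=
        List.length_filter_lt_length_iff_exists.mpr ⟨_, hp, by simp⟩
      have hslt : (xs.filter (fun x => x < PySem.List.pyGetD xs 0 0)).length < xs.length :=
        List.length_filter_lt_length_iff_exists.mpr ⟨_, hp, by simp⟩
      simp only []
      split_ifs with hbig heq
      · rw [ih _ (by omega) m acc,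
          sorted_rev_partition3 xs (PySem.List.pyGetD xs 0 0), List.append_assoc,
          List.take_append_of_le_length (by rw [PySem.List.length_sorted]; omega)]
      · rw [sorted_rev_partition3 xs (PySem.List.pyGetD xs 0 0),
          List.take_append, List.take_append,
          List.take_of_length_le (by rw [PySem.List.length_sorted]; omega),
          List.sum_append, List.sum_append,
          (PySem.List.sorted_perm _ _ true).sum_eq,
          sum_take_all_eq _ (PySem.List.pyGetD xs 0 0) hm0]
        have hz : m.toNat - (PySem.List.sorted
            (xs.filter (fun x => PySem.List.pyGetD xs 0 0 < x)) (fun x => x) true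
            ++ xs.filter (fun x => x = PySem.List.pyGetD xs 0 0)).length = 0 := by
          simp only [List.length_append, PySem.List.length_sorted]; omega
        have hj : ((min (m.toNat - (PySem.List.sorted
            (xs.filter (fun x => PySem.List.pyGetD xs 0 0 < x)) (fun x => x) true).length)
            (xs.filter (fun x => x = PySem.List.pyGetD xs 0 0)).length : Nat) : Int)
            = m - (xs.filter (fun x => PySem.List.pyGetD xs 0 0 < x)).length := by
          rw [PySem.List.length_sorted]; omega
        rw [hz]
        simp only [List.take_zero, List.sum_nil, add_zero]
        rw [← hj]
        ring
      · rw [ih _ (by omega) _ _,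
          sorted_rev_partition3 xs (PySem.List.pyGetD xs 0 0),
          List.take_append,
          List.take_of_length_le
            (l := PySem.List.sorted (xs.filter (fun x => PySem.List.pyGetD xs 0 0 < x))
                (fun x => x) true ++ xs.filter (fun x => x = PySem.List.pyGetD xs 0 0))
            (by simp only [List.length_append, PySem.List.length_sorted]; omega),
          List.sum_append, List.sum_append,
          (PySem.List.sorted_perm (xs.filter (fun x => PySem.List.pyGetD xs 0 0 < x))
            (fun x => x) true).sum_eq]
        have hj : (m - ((xs.filter (fun x => PySem.List.pyGetD xs 0 0 < x)).length : Int)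
            - ((xs.filter (fun x => x = PySem.List.pyGetD xs 0 0)).length : Int)).toNat
            = m.toNat - (PySem.List.sorted (xs.filter (fun x => PySem.List.pyGetD xs 0 0 < x))
                (fun x => x) true ++ xs.filter (fun x => x = PySem.List.pyGetD xs 0 0)).length := by
          simp only [List.length_append, PySem.List.length_sorted]; omega
        rw [hj]
        ring

theorem solution_spec : Claim_equal_solution := by
  intro n k c _ hpre
  unfold Spec_solution solution solution_alt
  by_cases hk : k ≥ n
  · simp [hk]
  · simp only [if_neg hk]
    rw [PySem.List.foldl_append_singleton_eq_map, foldl_tail_eq_drop]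
    simp only [List.nil_append]
    set cs := PySem.List.sorted c (fun x => x) false with hcs
    set gaps := (PySem.List.pyRange 1 n 1).map
      (fun i => PySem.List.pyGetD cs i 0 - PySem.List.pyGetD cs (i - 1) 0) with hgaps
    rw [topAccB_eq_aux gaps.length gaps le_rfl]
    set s := PySem.List.sorted gaps (fun x => x) true with hs
    have hsum : gaps.sum = s.sum := ((PySem.List.sorted_perm gaps _ true).sum_eq).symm
    have hM : (PySem.List.pyRange 0 (k - 1) 1).length = (k - 1).toNat := by
      rw [PySem.List.length_pyRange_one]; omega
    have hsplit : s.sum = (s.take (k - 1).toNat).sum + (s.drop (k - 1).toNat).sum := by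
      conv_lhs => rw [← List.take_append_drop (k - 1).toNat s]
      rw [List.sum_append]
    rw [hM]
    omega
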